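-- pv_equiv track=rewrite | github.com/relatio-nlp/relatio | Tutorial/pipeline.py | filter_sentences
-- ===== SOURCE A (Python) =====
-- from typing import Dict, List, NamedTuple, Optional, Tuple, Union, Any
--
-- def filter_sentences(
--     sentences: List[str],
--     max_sentence_length: Optional[int] = None,
--     max_number_words: Optional[int] = None,
-- ) -> List[str]:
--
--     """
--
--     Filter list of sentences based on the number of characters length.
--     Args:
--         max_sentence_length: Keep only sentences with a a number of character lower or equal to max_sentence_length. For max_number_words = max_sentence_length = -1 all sentences are kept.
--         max_number_words: Keep only sentences with a a number of words lower or equal to max_number_words. For max_number_words = max_sentence_length = -1 all sentences are kept.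
--     Returns:
--         Filtered list of sentences.
--     Examples:
--         >>> filter_sentences(['This is a house'])
--         ['This is a house']
--         >>> filter_sentences(['This is a house'], max_sentence_length=15)
--         ['This is a house']
--         >>> filter_sentences(['This is a house'], max_sentence_length=14)
--         []
--         >>> filter_sentences(['This is a house'], max_number_words=4)
--         ['This is a house']
--         >>> filter_sentences(['This is a house'], max_number_words=3)
--         []
--         >>> filter_sentences(['This is a house', 'It is a nice house'], max_number_words=5, max_sentence_length=18)
--         ['This is a house', 'It is a nice house']
--         >>> filter_sentences(['This is a house', 'It is a nice house'], max_number_words=4, max_sentence_length=18)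
--         ['This is a house']
--         >>> filter_sentences(['This is a house', 'It is a nice house'], max_number_words=5, max_sentence_length=17)
--         ['This is a house']
--         >>> filter_sentences(['This is a house', 'It is a nice house'], max_number_words=0, max_sentence_length=18)
--         []
--         >>> filter_sentences(['This is a house', 'It is a nice house'], max_number_words=5, max_sentence_length=0)
--         []
--         >>> filter_sentences(['This is a house', 'It is a nice house'])
--         ['This is a house', 'It is a nice house']
--         >>> filter_sentences(['This is a house', 'It is a nice house'], max_number_words=4)
--         ['This is a house']
--
--     """
--
--     if max_sentence_length is None and max_number_words is None:
--         pass
--     elif max_sentence_length == 0 or max_number_words == 0: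
--         sentences = []
--     else:
--         if max_sentence_length is not None:
--             sentences = [sent for sent in sentences if len(sent) <= max_sentence_length]
--
--             def filter_funct(sent):
--                 return len(sent) <= max_sentence_length
--
--         if max_number_words is not None:
--             sentences = [
--                 sent for sent in sentences if len(sent.split()) <= max_number_words
--             ]
--
--     return sentences
-- ===== SOURCE B (Python) =====
-- from typing import List, Optional
--
-- def filter_sentences(
--     sentences: List[str],
--     max_sentence_length: Optional[int] = None,
--     max_number_words: Optional[int] = None,
-- ) -> List[str]:
--     if max_sentence_length is None and max_number_words is None:
--         return sentences
--     if max_sentence_length == 0 or max_number_words == 0: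
--         return []
--     kept = []
--     for sent in sentences:
--         if max_sentence_length is not None and len(sent) > max_sentence_length:
--             continue
--         if max_number_words is not None and len(sent.split()) > max_number_words:
--             continue
--         kept.append(sent)
--     return kept
-- ===== Notes on version B (the rewrite author's own statement) =====
-- stated objective: alternative
-- what changed: Replaces A's staged pipeline of two sequential filtering list comprehensions (rebinding `sentences` between passes) with a single explicit loop that rejects each sentence via negated guard clauses with `continue` and accumulates survivors, so the word count is computed only for sentences that already passed the length check.
import Mathlib
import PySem

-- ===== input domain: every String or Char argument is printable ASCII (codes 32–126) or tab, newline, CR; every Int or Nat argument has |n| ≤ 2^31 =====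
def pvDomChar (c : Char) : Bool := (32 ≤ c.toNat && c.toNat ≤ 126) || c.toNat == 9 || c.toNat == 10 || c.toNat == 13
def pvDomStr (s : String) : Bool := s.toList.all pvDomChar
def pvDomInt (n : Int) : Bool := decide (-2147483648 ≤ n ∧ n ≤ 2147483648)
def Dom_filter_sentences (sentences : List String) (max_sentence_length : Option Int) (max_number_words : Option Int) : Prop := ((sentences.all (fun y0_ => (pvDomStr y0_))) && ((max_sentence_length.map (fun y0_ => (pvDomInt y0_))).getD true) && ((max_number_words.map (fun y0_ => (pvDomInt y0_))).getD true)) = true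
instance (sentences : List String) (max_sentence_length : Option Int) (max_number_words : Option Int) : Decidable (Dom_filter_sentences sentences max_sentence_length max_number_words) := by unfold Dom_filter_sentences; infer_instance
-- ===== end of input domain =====

-- B replaces A's two staged filtering comprehensions with one explicit accumulator loop with negated guard clauses (objective: alternative).


-- ===== PORT A =====
-- len(sent) and len(sent.split()) as Int, via PySem
def pvCharLen (s : String) : Int := PySem.Str.len s
def pvWordCount (s : String) : Int := ((PySem.Str.split₀ s).length : Int)

-- A: both-None pass; ==0 guard; then two sequential filtering passes rebinding `sentences`
def filter_sentences (sentences : List String) (max_sentence_length : Option Int) (max_number_words : Option Int) : List String :=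
  if max_sentence_length = none ∧ max_number_words = none then
    sentences
  else if max_sentence_length = some 0 ∨ max_number_words = some 0 then
    []
  else
    let s1 := match max_sentence_length with
      | some m => sentences.filter (fun sent => decide (pvCharLen sent ≤ m))
      | none => sentences
    match max_number_words with
      | some w => s1.filter (fun sent => decide (pvWordCount sent ≤ w))
      | none => s1

-- ===== PORT B =====
-- B's loop body: reject via negated guards (the `continue`s), else append the survivor
def pvKeepLoop (msl mnw : Option Int) (acc : List String) : List String → List String
  | [] => acc
  | sent :: rest =>
    if (match msl with | some m => decide (pvCharLen sent > m) | none => false) then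
      pvKeepLoop msl mnw acc rest
    else if (match mnw with | some w => decide (pvWordCount sent > w) | none => false) then
      pvKeepLoop msl mnw acc rest
    else
      pvKeepLoop msl mnw (acc ++ [sent]) rest

-- B: guard clauses, then the single explicit accumulator loop
def filter_sentences_alt (sentences : List String) (max_sentence_length : Option Int) (max_number_words : Option Int) : List String :=
  if max_sentence_length = none ∧ max_number_words = none then
    sentences
  else if max_sentence_length = some 0 ∨ max_number_words = some 0 then
    []
  else
    pvKeepLoop max_sentence_length max_number_words [] sentences

-- ===== PRECONDITION & SPEC =====
def Spec_filter_sentences (sentences : List String) (max_sentence_length : Option Int) (max_number_words : Option Int) (out : List String) : Prop := out = filter_sentences_alt sentences max_sentence_length max_number_words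
instance (sentences : List String) (max_sentence_length : Option Int) (max_number_words : Option Int) (out : List String) : Decidable (Spec_filter_sentences sentences max_sentence_length max_number_words out) := by unfold Spec_filter_sentences; infer_instance

-- ===== CLAIM =====
def Claim_equal_filter_sentences : Prop := ∀ (sentences : List String) (max_sentence_length : Option Int) (max_number_words : Option Int), Dom_filter_sentences sentences max_sentence_length max_number_words → Spec_filter_sentences sentences max_sentence_length max_number_words (filter_sentences sentences max_sentence_length max_number_words)

-- ===== LEMMAS AND PROOFS =====
-- !decide(lim < x) is decide(x ≤ lim): the negated guards are the kept-predicates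
theorem pvNotGt (lim x : Int) : (!decide (lim < x)) = decide (x ≤ lim) := by
  by_cases h : lim < x <;> simp [h] <;> omega

-- The accumulator loop is `acc ++` a filter by the conjunction of the negated guards.
theorem pvKeepLoop_eq (msl mnw : Option Int) (xs : List String) : ∀ acc : List String,
    pvKeepLoop msl mnw acc xs = acc ++ xs.filter (fun sent =>
      !(match msl with | some m => decide (pvCharLen sent > m) | none => false) &&
      !(match mnw with | some w => decide (pvWordCount sent > w) | none => false)) := by
  rcases msl with _ | m <;> rcases mnw with _ | w <;>
  · induction xs with
    | nil => intro acc; simp [pvKeepLoop]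
    | cons sent rest ih =>
      intro acc
      simp only [pvKeepLoop]
      split_ifs with h1 h2 <;> simp_all [List.filter_cons]

-- ===== VERDICT =====
theorem filter_sentences_spec : Claim_equal_filter_sentences := by
  intro sentences msl mnw _
  unfold Spec_filter_sentences filter_sentences filter_sentences_alt
  rcases msl with _ | m <;> rcases mnw with _ | w <;>
    simp [pvKeepLoop_eq, List.filter_filter, pvNotGt, Bool.and_comm]
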